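-- pv_equiv track=rewrite | github.com/GG4GG4/ggaggalang | ggaggalang/optimizer.py | optimize_loop_invariants
-- ===== SOURCE A (Python) =====
-- from typing import List, Tuple, Dict, Set, Optional, Iterator
--
-- def optimize_loop_invariants(commands: List[str]) -> List[str]:
--     """
--     루프 불변 코드 최적화
--     루프 내부에서 변하지 않는 코드 패턴 추출
--
--     Args:
--         commands: 원본 명령어 목록
--
--     Returns:
--         최적화된 명령어 목록
--     """
--     # 루프 시작과 끝 위치 매핑 찾기
--     loop_map = {}
--     loop_stack = []
--
--     for i, cmd in enumerate(commands):
--         if cmd == 'galanglang':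
--             loop_stack.append(i)
--         elif cmd == 'langlaggug':
--             if loop_stack:
--                 start = loop_stack.pop()
--                 loop_map[start] = i
--                 loop_map[i] = start
--
--     # 루프 내부 최적화 적용
--     optimized = commands.copy()
--
--     # 루프별 분석 및 최적화 (간단한 예시)
--     for start, end in sorted(loop_map.items()):
--         if start < end:  # 시작점만 처리
--             loop_body = commands[start+1:end]
--
--             # 간단한 루프 패턴 최적화 예시
--             if len(loop_body) == 1 and loop_body[0] == 'gga':
--                 # [+] 패턴은 셀을 0으로 설정
--                 optimized[start:end+1] = ["CLEAR"]
--
--             # 다른 루프 패턴도 필요에 따라 추가 가능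
--
--     return optimized
-- ===== SOURCE B (Python) =====
-- def optimize_loop_invariants(commands):
--     """Single left-to-right scan: collapse each galanglang,gga,langlaggug triple to CLEAR."""
--     out = []
--     i = 0
--     n = len(commands)
--     while i < n:
--         if (i + 2 < n and commands[i] == 'galanglang'
--                 and commands[i + 1] == 'gga' and commands[i + 2] == 'langlaggug'):
--             out.append('CLEAR')
--             i += 3
--         else:
--             out.append(commands[i])
--             i += 1
--     return out
-- ===== Notes on version B (the rewrite author's own statement) =====
-- stated objective: alternative
-- what changed: Replaces A's bracket-matching stack + dict + sorted(items) + repeated slice assignments by a single left-to-right scan that emits CLEAR for each galanglang,gga,langlaggug triple and copies everything else.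
-- intended difference: On inputs containing two or more galanglang,gga,langlaggug triples, A applies its later slice assignments at stale pre-shrink indices and returns a mangled program (for two adjacent clear-loops it keeps the second loop's galanglang,gga and overwrites only its closer), while B collapses every such loop to CLEAR, which is the optimization's intent. — e.g. on optimize_loop_invariants(["galanglang", "gga", "langlaggug", "galanglang", "gga", "langlaggug"]): A returns ["CLEAR", "galanglang", "gga", "CLEAR"], B returns ["CLEAR", "CLEAR"]
import Mathlib
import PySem

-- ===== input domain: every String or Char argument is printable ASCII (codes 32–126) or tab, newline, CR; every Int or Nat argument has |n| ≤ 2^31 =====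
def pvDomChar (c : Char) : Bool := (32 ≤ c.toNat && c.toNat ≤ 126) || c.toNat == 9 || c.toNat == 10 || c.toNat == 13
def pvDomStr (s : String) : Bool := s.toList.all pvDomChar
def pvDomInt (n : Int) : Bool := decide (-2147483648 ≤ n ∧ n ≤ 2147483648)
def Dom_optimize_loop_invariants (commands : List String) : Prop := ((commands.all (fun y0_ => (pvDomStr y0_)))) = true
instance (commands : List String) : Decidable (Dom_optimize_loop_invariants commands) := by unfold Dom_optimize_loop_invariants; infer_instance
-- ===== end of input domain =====

-- B replaces A's bracket-matching dict + sort + repeated slice assignments by ONE linear scan that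
-- collapses each ⟨"galanglang","gga","langlaggug"⟩ triple to "CLEAR"; on inputs with ≥ 2 such triples
-- A's stale original indices mangle the later loops (see D_ below) and B returns the intended collapse.

-- ===== PORT A =====
-- matcher step: the body of A's first for-loop (loop_stack.pop() pops the LAST element; exact)
def pvStep (st : PySem.Dict Int Int × List Int) (p : Int × String) :
    PySem.Dict Int Int × List Int :=
  let loop_map := st.1
  let loop_stack := st.2
  let i := p.1
  let cmd := p.2
  if cmd = "galanglang" then (loop_map, loop_stack ++ [i])
  else if cmd = "langlaggug" then
    match PySem.List.pop? loop_stack with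
    | some (start, rest) => ((loop_map.insert start i).insert i start, rest)
    | none => (loop_map, loop_stack)
  else (loop_map, loop_stack)

def optimize_loop_invariants (commands : List String) : List String :=
  let res := (PySem.List.enumerate commands).foldl pvStep (PySem.Dict.empty, [])
  let loop_map := res.1
  let optimized := commands
  -- sorted(loop_map.items()): pairs of distinct keys compared lexicographically
  (PySem.List.sorted2 loop_map.items Prod.fst Prod.snd).foldl
    (fun optimized p =>
      let start := p.1
      let _end := p.2
      if start < _end then
        let loop_body := PySem.List.slice commands (some (start + 1)) (some _end)
        if loop_body.length = 1 ∧ PySem.List.pyGet? loop_body 0 = some "gga" then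
          -- optimized[start:end+1] = ["CLEAR"]; 0 ≤ start < end+1, so this is exactly
          -- optimized[:start] ++ ["CLEAR"] ++ optimized[end+1:]
          PySem.List.slice optimized none (some start) ++ ["CLEAR"] ++
            PySem.List.slice optimized (some (_end + 1)) none
        else optimized
      else optimized)
    optimized

-- ===== PORT B =====
-- `i+2 < n and commands[i]==… and …`: the bounds check plus the three reads is exactly the
-- three getElem? equalities
def pvTripleB (commands : List String) (i : Nat) : Bool :=
  commands[i]? == some "galanglang" && commands[i+1]? == some "gga" &&
    commands[i+2]? == some "langlaggug"

-- the while-loop of Source B: index i, accumulator out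
def pvBGo (commands : List String) (i : Nat) (out : List String) : List String :=
  if h : i < commands.length then
    if pvTripleB commands i then pvBGo commands (i + 3) (out ++ ["CLEAR"])
    else pvBGo commands (i + 1) (out ++ [commands[i]])
  else out
termination_by commands.length - i

def optimize_loop_invariants_alt (commands : List String) : List String :=
  pvBGo commands 0 []

-- ===== PRECONDITION & SPEC =====
-- On inputs containing at least two ⟨"galanglang","gga","langlaggug"⟩ triples, A applies its later
-- slice assignments at stale pre-shrink indices and returns a mangled program (e.g. leaving
-- "galanglang","gga" and overwriting the closer), while B collapses every such loop to "CLEAR",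
-- which is the optimization's intent.
def D_optimize_loop_invariants (commands : List String) : Prop :=
  ∃ i < commands.length, ∃ j < commands.length, i < j ∧
    (commands.drop i).take 3 = ["galanglang", "gga", "langlaggug"] ∧
    (commands.drop j).take 3 = ["galanglang", "gga", "langlaggug"]
instance (commands : List String) : Decidable (D_optimize_loop_invariants commands) := by
  unfold D_optimize_loop_invariants; infer_instance

def Spec_optimize_loop_invariants (commands : List String) (out : List String) : Prop :=
  ¬ D_optimize_loop_invariants commands → out = optimize_loop_invariants_alt commands
instance (commands : List String) (out : List String) :
    Decidable (Spec_optimize_loop_invariants commands out) := by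
  unfold Spec_optimize_loop_invariants; infer_instance

def pvDiffWitness_optimize_loop_invariants : List String :=
  ["galanglang", "gga", "langlaggug", "galanglang", "gga", "langlaggug"]
def pvDiffWitnessOut_optimize_loop_invariants : (List String) × (List String) :=
  (["CLEAR", "galanglang", "gga", "CLEAR"], ["CLEAR", "CLEAR"])

-- ===== CLAIM (what is proved, stated in full; the proofs are below) =====
def Claim_unchanged_optimize_loop_invariants : Prop := ∀ (commands : List String), Dom_optimize_loop_invariants commands → Spec_optimize_loop_invariants commands (optimize_loop_invariants commands)
def Claim_changed_optimize_loop_invariants : Prop := Dom_optimize_loop_invariants (pvDiffWitness_optimize_loop_invariants) ∧ D_optimize_loop_invariants (pvDiffWitness_optimize_loop_invariants) ∧ optimize_loop_invariants (pvDiffWitness_optimize_loop_invariants) = pvDiffWitnessOut_optimize_loop_invariants.1 ∧ optimize_loop_invariants_alt (pvDiffWitness_optimize_loop_invariants) = pvDiffWitnessOut_optimize_loop_invariants.2 ∧ pvDiffWitnessOut_optimize_loop_invariants.1 ≠ pvDiffWitnessOut_optimize_loop_invariants.2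
def Claim_exact_optimize_loop_invariants : Prop := ∀ (commands : List String), Dom_optimize_loop_invariants commands → D_optimize_loop_invariants commands → optimize_loop_invariants commands ≠ optimize_loop_invariants_alt commands

-- ===== LEMMAS AND PROOFS =====

-- invariant of A's matcher fold after processing the first m commands
structure pvMinv (cs : List String) (m : Nat) (d : PySem.Dict Int Int) (st : List Int) : Prop where
  h1 : ∀ k ∈ st, ∃ kn : Nat, k = (kn : Int) ∧ kn < m ∧ cs[kn]? = some "galanglang"
  h2 : st.Pairwise (· < ·)
  h3 : d.keys.Nodup
  h4 : ∀ i j : Int, d.get? i = some j → i < j →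
        ∃ a b : Nat, i = (a : Int) ∧ j = (b : Int) ∧ b < m ∧
          cs[a]? = some "galanglang" ∧ cs[b]? = some "langlaggug"
  h5 : ∀ t : Nat, pvTripleB cs t = true → t + 2 < m →
        d.get? (t : Int) = some ((t : Int) + 2) ∧ (t : Int) ∉ st
  h6 : ∀ t : Nat, t + 1 = m → cs[t]? = some "galanglang" → st.getLast? = some (t : Int)
  h7 : ∀ t : Nat, t + 2 = m → cs[t]? = some "galanglang" → cs[t+1]? = some "gga" →
        st.getLast? = some (t : Int)

theorem pvTripleB_iff (cs : List String) (t : Nat) :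
    pvTripleB cs t = true ↔
      cs[t]? = some "galanglang" ∧ cs[t+1]? = some "gga" ∧ cs[t+2]? = some "langlaggug" := by
  simp [pvTripleB, and_assoc]

theorem pvTripleB_shape (cs : List String) (t : Nat) :
    pvTripleB cs t = true ↔
      (cs.drop t).take 3 = ["galanglang", "gga", "langlaggug"] := by
  rw [pvTripleB_iff]
  constructor
  · rintro ⟨h0, h1, h2⟩
    have hl : t + 2 < cs.length := (List.getElem?_eq_some_iff.mp h2).1
    rw [List.drop_eq_getElem_cons (show t < cs.length by omega)]
    rw [show t + 1 = (t+1) from rfl] at h1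
    have hd1 : cs.drop (t+1) = cs[t+1] :: cs.drop (t+2) :=
      List.drop_eq_getElem_cons (show t + 1 < cs.length by omega)
    have hd2 : cs.drop (t+2) = cs[t+2] :: cs.drop (t+3) :=
      List.drop_eq_getElem_cons (show t + 2 < cs.length by omega)
    rw [hd1, hd2]
    simp only [List.take_succ_cons, List.take_zero]
    rw [(List.getElem?_eq_some_iff.mp h0).2, (List.getElem?_eq_some_iff.mp h1).2,
      (List.getElem?_eq_some_iff.mp h2).2]
  · intro h
    refine ⟨?_, ?_, ?_⟩
    · have h' := congrArg (fun l => l[0]?) h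
      simp only [List.getElem?_take_of_lt (show (0:Nat) < 3 by omega), List.getElem?_drop,
        Nat.add_zero] at h'
      simpa using h'
    · have h' := congrArg (fun l => l[1]?) h
      simp only [List.getElem?_take_of_lt (show (1:Nat) < 3 by omega), List.getElem?_drop] at h'
      simpa using h'
    · have h' := congrArg (fun l => l[2]?) h
      simp only [List.getElem?_take_of_lt (show (2:Nat) < 3 by omega), List.getElem?_drop] at h'
      simpa using h'

theorem pvStep_gala (d : PySem.Dict Int Int) (st : List Int) (i : Int) :
    pvStep (d, st) (i, "galanglang") = (d, st ++ [i]) := rfl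

theorem pvStep_close (d : PySem.Dict Int Int) (st : List Int) (i : Int) (hne : st ≠ []) :
    pvStep (d, st) (i, "langlaggug") =
      ((d.insert (st.getLast hne) i).insert i (st.getLast hne), st.dropLast) := by
  have hp : PySem.List.pop? st = some (st.getLast hne, st.dropLast) := by
    conv_lhs => rw [← List.dropLast_append_getLast hne]
    exact PySem.List.pop?_last _ _
  simp [pvStep, hp]

theorem pvStep_close_nil (d : PySem.Dict Int Int) (i : Int) :
    pvStep (d, []) (i, "langlaggug") = (d, []) := rfl

theorem pvStep_other (d : PySem.Dict Int Int) (st : List Int) (i : Int) (cmd : String)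
    (hg : cmd ≠ "galanglang") (hl : cmd ≠ "langlaggug") :
    pvStep (d, st) (i, cmd) = (d, st) := by
  simp [pvStep, hg, hl]

theorem pvMinv_step (cs : List String) (m : Nat) (d : PySem.Dict Int Int) (st : List Int)
    (hinv : pvMinv cs m d st) (cmd : String) (hm : cs[m]? = some cmd) :
    pvMinv cs (m + 1) (pvStep (d, st) ((m : Int), cmd)).1 (pvStep (d, st) ((m : Int), cmd)).2 := by
  obtain ⟨h1, h2, h3, h4, h5, h6, h7⟩ := hinv
  have hmlen : m < cs.length := (List.getElem?_eq_some_iff.mp hm).1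
  have hstlt : ∀ k ∈ st, k < (m : Int) := by
    intro k hk
    obtain ⟨kn, rfl, hkn, -⟩ := h1 k hk
    exact_mod_cast hkn
  by_cases hg : cmd = "galanglang"
  · subst hg
    rw [pvStep_gala]
    refine ⟨?_, ?_, h3, ?_, ?_, ?_, ?_⟩
    · intro k hk
      rcases List.mem_append.mp hk with hk | hk
      · obtain ⟨kn, rfl, hkn, hc⟩ := h1 k hk
        exact ⟨kn, rfl, by omega, hc⟩
      · rcases List.mem_singleton.mp hk with rfl
        exact ⟨m, rfl, by omega, hm⟩
    · refine List.pairwise_append.mpr ⟨h2, by simp, ?_⟩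
      intro a ha b hb
      rcases List.mem_singleton.mp hb with rfl
      exact hstlt a ha
    · intro i j hg hij
      obtain ⟨a, b, rfl, rfl, hb, hca, hcb⟩ := h4 i j hg hij
      exact ⟨a, b, rfl, rfl, by omega, hca, hcb⟩
    · intro t htr ht2
      rcases Nat.lt_succ_iff_lt_or_eq.mp ht2 with ht2 | ht2
      · obtain ⟨hga, hns⟩ := h5 t htr ht2
        refine ⟨hga, ?_⟩
        intro hmem
        rcases List.mem_append.mp hmem with hmem | hmem
        · exact hns hmem
        · rcases List.mem_singleton.mp hmem with heq
          have : t = m := by exact_mod_cast heq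
          omega
      · obtain ⟨-, -, hc3⟩ := (pvTripleB_iff cs t).mp htr
        rw [ht2, hm] at hc3
        simp at hc3
    · intro t ht hc
      have : t = m := by omega
      subst this
      simp
    · intro t ht hc1 hc2
      have : t + 1 = m := by omega
      rw [this, hm] at hc2
      simp at hc2
  · by_cases hl : cmd = "langlaggug"
    · subst hl
      cases hstnil : st with
      | nil =>
        subst hstnil
        rw [pvStep_close_nil]
        refine ⟨by simp, by simp, h3, ?_, ?_, ?_, ?_⟩
        · intro i j hg hij
          obtain ⟨a, b, rfl, rfl, hb, hca, hcb⟩ := h4 i j hg hij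
          exact ⟨a, b, rfl, rfl, by omega, hca, hcb⟩
        · intro t htr ht2
          rcases Nat.lt_succ_iff_lt_or_eq.mp ht2 with ht2 | ht2
          · exact ⟨(h5 t htr ht2).1, by simp⟩
          · obtain ⟨hc1, hc2, hc3⟩ := (pvTripleB_iff cs t).mp htr
            have := h7 t ht2 hc1 hc2
            simp at this
        · intro t ht hc
          have : t = m := by omega
          subst this
          rw [hm] at hc
          simp at hc
        · intro t ht hc1 hc2
          have : t + 1 = m := by omega
          rw [this, hm] at hc2
          simp at hc2
      | cons s0 st' =>
        have hne : st ≠ [] := by rw [hstnil]; simp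
        rw [← hstnil]
        rw [pvStep_close d st (m : Int) hne]
        dsimp only
        set L := st.getLast hne with hL
        have hLmem : L ∈ st := List.getLast_mem hne
        obtain ⟨ln, hLn, hlnm, hlng⟩ := h1 L hLmem
        have hsplit : st.dropLast ++ [L] = st := List.dropLast_append_getLast hne
        have hsub : ∀ x ∈ st.dropLast, x ∈ st :=
          fun x hx => List.Sublist.subset (List.dropLast_sublist st) hx
        refine ⟨?_, List.Pairwise.sublist (List.dropLast_sublist st) h2, ?_, ?_, ?_, ?_, ?_⟩
        · intro k hk
          obtain ⟨kn, rfl, hkn, hc⟩ := h1 k (hsub k hk)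
          exact ⟨kn, rfl, by omega, hc⟩
        · exact PySem.Dict.nodup_keys_insert _ _ _ (PySem.Dict.nodup_keys_insert _ _ _ h3)
        · intro i j hg hij
          rw [PySem.Dict.get?_insert] at hg
          by_cases him : i = (m : Int)
          · rw [if_pos him] at hg
            have hjL : j = L := (Option.some.inj hg).symm
            have hjm : j < (m : Int) := hjL ▸ hstlt L hLmem
            rw [him] at hij
            exact absurd hij (by omega)
          · rw [if_neg him, PySem.Dict.get?_insert] at hg
            by_cases hiL : i = L
            · rw [if_pos hiL] at hg
              have hj : j = (m : Int) := (Option.some.inj hg).symm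
              subst hj
              refine ⟨ln, m, by rw [hiL, hLn], rfl, by omega, hlng, hm⟩
            · rw [if_neg hiL] at hg
              obtain ⟨a, b, rfl, rfl, hb, hca, hcb⟩ := h4 i j hg hij
              exact ⟨a, b, rfl, rfl, by omega, hca, hcb⟩
        · intro t htr ht2
          obtain ⟨hc1, hc2, hc3⟩ := (pvTripleB_iff cs t).mp htr
          rcases Nat.lt_succ_iff_lt_or_eq.mp ht2 with ht2 | ht2
          · obtain ⟨hga, hns⟩ := h5 t htr ht2
            have htm : (t : Int) ≠ (m : Int) := by
              intro h
              have : t = m := by exact_mod_cast h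
              omega
            have htL : (t : Int) ≠ L := fun h => hns (h ▸ hLmem)
            rw [PySem.Dict.get?_insert, if_neg htm, PySem.Dict.get?_insert, if_neg htL]
            exact ⟨hga, fun hmem => hns (hsub _ hmem)⟩
          · have hgl : st.getLast? = some ((t : Int)) := h7 t ht2 hc1 hc2
            have hLt : L = (t : Int) := by
              have : st.getLast? = some L := by
                conv_lhs => rw [← hsplit]
                exact List.getLast?_concat
              rw [this] at hgl
              injection hgl
            have htm : (t : Int) ≠ (m : Int) := by
              intro h
              have : t = m := by exact_mod_cast h
              omega
            rw [PySem.Dict.get?_insert, if_neg htm, PySem.Dict.get?_insert, if_pos hLt.symm]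
            constructor
            · congr 1
              omega
            · intro hmem
              have hpw := List.pairwise_append.mp (hsplit ▸ h2)
              have := hpw.2.2 _ hmem L (by simp)
              rw [hLt] at this
              exact absurd this (lt_irrefl _)
        · intro t ht hc
          have : t = m := by omega
          subst this
          rw [hm] at hc
          simp at hc
        · intro t ht hc1 hc2
          have : t + 1 = m := by omega
          rw [this, hm] at hc2
          simp at hc2
    · rw [pvStep_other d st (m : Int) cmd hg hl]
      refine ⟨?_, h2, h3, ?_, ?_, ?_, ?_⟩
      · intro k hk
        obtain ⟨kn, rfl, hkn, hc⟩ := h1 k hk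
        exact ⟨kn, rfl, by omega, hc⟩
      · intro i j hgj hij
        obtain ⟨a, b, rfl, rfl, hb, hca, hcb⟩ := h4 i j hgj hij
        exact ⟨a, b, rfl, rfl, by omega, hca, hcb⟩
      · intro t htr ht2
        obtain ⟨hc1, hc2, hc3⟩ := (pvTripleB_iff cs t).mp htr
        rcases Nat.lt_succ_iff_lt_or_eq.mp ht2 with ht2 | ht2
        · exact h5 t htr ht2
        · rw [ht2, hm] at hc3
          exact absurd hc3 (by simp [hl])
      · intro t ht hc
        have : t = m := by omega
        subst this
        rw [hm] at hc
        exact absurd hc (by simp [hg])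
      · intro t ht hc1 hc2
        have : t + 1 = m := by omega
        rw [this, hm] at hc2
        exact h6 t (by omega) hc1

theorem pvMinv_fold (cs : List String) :
    ∀ (l : List String) (s : Nat), cs.drop s = l → ∀ (d : PySem.Dict Int Int) (st : List Int),
      pvMinv cs s d st →
      pvMinv cs (s + l.length) ((PySem.List.enumerate l (s : Int)).foldl pvStep (d, st)).1
        ((PySem.List.enumerate l (s : Int)).foldl pvStep (d, st)).2 := by
  intro l
  induction l with
  | nil =>
    intro s hdrop d st hinv
    have he : PySem.List.enumerate ([] : List String) (s : Int) = [] := rfl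
    rw [he]
    exact (Nat.add_zero s) ▸ hinv
  | cons c t ih =>
    intro s hdrop d st hinv
    have hcs : cs[s]? = some c := by
      have h0 : (cs.drop s)[0]? = some c := by rw [hdrop]; rfl
      rwa [List.getElem?_drop, Nat.add_zero] at h0
    have hstep := pvMinv_step cs s d st hinv c hcs
    have hdrop' : cs.drop (s + 1) = t := by
      have h := congrArg List.tail hdrop
      rwa [List.tail_drop] at h
    have := ih (s + 1) hdrop' _ _ hstep
    rw [PySem.List.enumerate_cons, List.foldl_cons]
    have hcast : ((s : Int) + 1) = ((s + 1 : Nat) : Int) := by push_cast; ring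
    rw [hcast, show s + (c :: t).length = s + 1 + t.length by simp [List.length_cons]; omega]
    exact this

theorem pvMinv_final (cs : List String) :
    pvMinv cs cs.length ((PySem.List.enumerate cs).foldl pvStep (PySem.Dict.empty, [])).1
      ((PySem.List.enumerate cs).foldl pvStep (PySem.Dict.empty, [])).2 := by
  have hbase : pvMinv cs 0 PySem.Dict.empty [] := by
    refine ⟨by simp, by simp, PySem.Dict.nodup_keys_empty, ?_, ?_, by omega, by omega⟩
    · intro i j hg
      rw [PySem.Dict.get?_empty] at hg
      exact absurd hg (by simp)
    · intro t _ ht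
      omega
  have := pvMinv_fold cs cs 0 (by simp) PySem.Dict.empty [] hbase
  simpa using this

-- A's second fold: its condition and action
abbrev pvCond (cs : List String) (p : Int × Int) : Prop :=
  p.1 < p.2 ∧ (PySem.List.slice cs (some (p.1 + 1)) (some p.2)).length = 1 ∧
    PySem.List.pyGet? (PySem.List.slice cs (some (p.1 + 1)) (some p.2)) 0 = some "gga"

def pvAct (acc : List String) (p : Int × Int) : List String :=
  PySem.List.slice acc none (some p.1) ++ ["CLEAR"] ++ PySem.List.slice acc (some (p.2 + 1)) none

theorem pvA_eq_foldl (cs : List String) :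
    optimize_loop_invariants cs =
      (PySem.List.sorted2 ((PySem.List.enumerate cs).foldl pvStep (PySem.Dict.empty, [])).1.items
          Prod.fst Prod.snd).foldl
        (fun acc p => if pvCond cs p then pvAct acc p else acc) cs := by
  unfold optimize_loop_invariants
  dsimp only
  congr 1
  funext acc p
  by_cases h1 : p.1 < p.2
  · by_cases h2 : (PySem.List.slice cs (some (p.1 + 1)) (some p.2)).length = 1 ∧
        PySem.List.pyGet? (PySem.List.slice cs (some (p.1 + 1)) (some p.2)) 0 = some "gga"
    · simp [pvCond, pvAct, h1, h2]
    · simp only [pvCond]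
      rw [if_neg h2, if_pos h1, if_neg (by tauto)]
  · simp only [pvCond]
    rw [if_neg h1, if_neg (by tauto)]

-- trigger characterization: a dict item fires A's replacement iff it is a triple (t, t+2)
theorem pvCond_char (cs : List String) (p : Int × Int)
    (hp : p ∈ ((PySem.List.enumerate cs).foldl pvStep (PySem.Dict.empty, [])).1.items
      ∨ p ∈ PySem.List.sorted2
          ((PySem.List.enumerate cs).foldl pvStep (PySem.Dict.empty, [])).1.items
          Prod.fst Prod.snd)
    (hc : pvCond cs p) :
    ∃ t : Nat, pvTripleB cs t = true ∧ p = ((t : Int), (t : Int) + 2) := by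
  have inv := pvMinv_final cs
  have hpi : p ∈ ((PySem.List.enumerate cs).foldl pvStep (PySem.Dict.empty, [])).1.items := by
    rcases hp with h | h
    · exact h
    · exact (PySem.List.sorted2_perm _ _ _ _).mem_iff.mp h
  have hget : ((PySem.List.enumerate cs).foldl pvStep (PySem.Dict.empty, [])).1.get? p.1
      = some p.2 :=
    PySem.Dict.get?_of_mem_items _ (by exact hpi) inv.h3
  obtain ⟨hlt, hlen, hget0⟩ := hc
  obtain ⟨a, b, ha, hb, hblen, hca, hcb⟩ := inv.h4 p.1 p.2 hget hlt
  have hab : a < b := by rw [ha, hb] at hlt; exact_mod_cast hlt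
  have hcast1 : (p.1 + 1) = ((a + 1 : Nat) : Int) := by rw [ha]; push_cast; ring
  rw [hcast1, hb, PySem.List.slice_natCast] at hlen hget0
  rw [List.length_take, List.length_drop] at hlen
  have hb2 : b = a + 2 := by omega
  have hg2 : cs[a+1]? = some "gga" := by
    have h0 : PySem.List.pyGet? (List.take (b - (a + 1)) (List.drop (a + 1) cs)) 0
        = (List.take (b - (a + 1)) (List.drop (a + 1) cs))[0]? := by
      simpa using PySem.List.pyGet?_natCast (List.take (b - (a + 1)) (List.drop (a + 1) cs)) 0
    rw [h0] at hget0
    rw [List.getElem?_take_of_lt (by omega), List.getElem?_drop, Nat.add_zero] at hget0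
    exact hget0
  refine ⟨a, ?_, ?_⟩
  · rw [pvTripleB_iff]
    exact ⟨hca, hg2, hb2 ▸ hcb⟩
  · have : p = (p.1, p.2) := rfl
    rw [this, ha, hb, hb2]
    push_cast
    ring_nf

theorem pvTripleLt (cs : List String) (t : Nat) (ht : pvTripleB cs t = true) :
    t + 2 < cs.length := by
  obtain ⟨-, -, h3⟩ := (pvTripleB_iff cs t).mp ht
  exact (List.getElem?_eq_some_iff.mp h3).1

theorem pvTriple_mem_items (cs : List String) (t : Nat) (ht : pvTripleB cs t = true) :
    ((t : Int), (t : Int) + 2) ∈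
      ((PySem.List.enumerate cs).foldl pvStep (PySem.Dict.empty, [])).1.items := by
  have inv := pvMinv_final cs
  exact PySem.Dict.mem_items_of_get?_eq_some _
    (inv.h5 t ht (pvTripleLt cs t ht)).1

-- generic facts about A's second fold
theorem pvFold_id (cs : List String) (l : List (Int × Int)) (acc : List String)
    (h : ∀ p ∈ l, ¬ pvCond cs p) :
    l.foldl (fun acc p => if pvCond cs p then pvAct acc p else acc) acc = acc := by
  induction l generalizing acc with
  | nil => rfl
  | cons x t ih =>
    simp only [List.foldl_cons, if_neg (h x (by simp))]
    exact ih acc fun p hp => h p (by simp [hp])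

theorem pvFold_one (cs : List String) (l : List (Int × Int)) (acc : List String) (e : Int × Int)
    (hcount : l.count e = 1) (he : pvCond cs e) (huniq : ∀ p ∈ l, pvCond cs p → p = e) :
    l.foldl (fun acc p => if pvCond cs p then pvAct acc p else acc) acc = pvAct acc e := by
  induction l generalizing acc with
  | nil => simp at hcount
  | cons x t ih =>
    by_cases hx : x = e
    · subst hx
      simp only [List.foldl_cons, if_pos he]
      have hnt : x ∉ t := by
        have := hcount
        rw [List.count_cons_self] at this
        have : t.count x = 0 := by omega
        exact (List.count_eq_zero.mp this)
      exact pvFold_id cs t (pvAct acc x) fun p hp hc => hnt ((huniq p (by simp [hp]) hc) ▸ hp)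
    · have hcx : ¬ pvCond cs x := fun hc => hx (huniq x (by simp) hc)
      simp only [List.foldl_cons, if_neg hcx]
      refine ih acc ?_ fun p hp hc => huniq p (by simp [hp]) hc
      rw [List.count_cons_of_ne (by exact fun h => hx h)] at hcount
      exact hcount

-- B's scan, characterized
theorem pvBGo_no_triple (cs : List String) :
    ∀ (i : Nat) (out : List String), (∀ j, i ≤ j → pvTripleB cs j = false) →
      pvBGo cs i out = out ++ cs.drop i := by
  suffices H : ∀ (n i : Nat) (out : List String), cs.length - i ≤ n →
      (∀ j, i ≤ j → pvTripleB cs j = false) → pvBGo cs i out = out ++ cs.drop i by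
    intro i out h
    exact H (cs.length - i) i out le_rfl h
  intro n
  induction n with
  | zero =>
    intro i out hn h
    rw [pvBGo, dif_neg (by omega)]
    rw [List.drop_eq_nil_of_le (by omega), List.append_nil]
  | succ n ih =>
    intro i out hn h
    by_cases hi : i < cs.length
    · rw [pvBGo, dif_pos hi, if_neg (by simp [h i le_rfl])]
      rw [ih (i + 1) (out ++ [cs[i]]) (by omega) (fun j hj => h j (by omega))]
      rw [List.append_assoc, List.singleton_append, List.getElem_cons_drop hi]
    · rw [pvBGo, dif_neg hi]
      rw [List.drop_eq_nil_of_le (by omega), List.append_nil]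

theorem pvBGo_one (cs : List String) (t : Nat) (ht : pvTripleB cs t = true)
    (huniq : ∀ j, pvTripleB cs j = true → j = t) :
    ∀ (n i : Nat) (out : List String), n = t - i → i ≤ t →
      pvBGo cs i out = out ++ (cs.drop i).take (t - i) ++ ["CLEAR"] ++ cs.drop (t + 3) := by
  have htlen : t + 2 < cs.length := by
    have h3 : cs[t+2]? = some "langlaggug" := by
      unfold pvTripleB at ht
      simp only [Bool.and_eq_true, beq_iff_eq] at ht
      exact ht.2
    have := List.getElem?_eq_some_iff.mp h3
    exact this.1
  intro n
  induction n with
  | zero =>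
    intro i out hn hit
    have hit' : i = t := by omega
    subst hit'
    rw [pvBGo, dif_pos (by omega), if_pos ht]
    rw [pvBGo_no_triple cs (i + 3) (out ++ ["CLEAR"]) (fun j hj => by
      cases hj' : pvTripleB cs j with
      | false => rfl
      | true => exact absurd (huniq j hj') (by omega))]
    simp
  | succ n ih =>
    intro i out hn hit
    by_cases hieq : i = t
    · subst hieq
      rw [pvBGo, dif_pos (by omega), if_pos ht]
      rw [pvBGo_no_triple cs (i + 3) (out ++ ["CLEAR"]) (fun j hj => by
        cases hj' : pvTripleB cs j with
        | false => rfl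
        | true => exact absurd (huniq j hj') (by omega))]
      simp
    · have hilt : i < t := by omega
      have hnf : pvTripleB cs i = false := by
        cases hj' : pvTripleB cs i with
        | false => rfl
        | true => exact absurd (huniq i hj') (by omega)
      rw [pvBGo, dif_pos (by omega), if_neg (by simp [hnf])]
      rw [ih (i + 1) (out ++ [cs[i]]) (by omega) (by omega)]
      have hdt : (cs.drop i).take (t - i) = cs[i] :: (cs.drop (i + 1)).take (t - (i + 1)) := by
        rw [List.drop_eq_getElem_cons (by omega : i < cs.length)]
        rw [show t - i = (t - (i + 1)) + 1 by omega]
        rfl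
      rw [hdt]
      simp

theorem pvCond_triple (cs : List String) (t : Nat) (ht : pvTripleB cs t = true) :
    pvCond cs ((t : Int), (t : Int) + 2) := by
  have hlen : t + 2 < cs.length := pvTripleLt cs t ht
  refine ⟨by omega, ?_, ?_⟩
  · rw [show ((t : Int) + 1) = ((t + 1 : Nat) : Int) by push_cast; ring,
      show ((t : Int) + 2) = ((t + 2 : Nat) : Int) by push_cast; ring,
      PySem.List.slice_natCast, List.length_take, List.length_drop]
    omega
  · rw [show ((t : Int) + 1) = ((t + 1 : Nat) : Int) by push_cast; ring,
      show ((t : Int) + 2) = ((t + 2 : Nat) : Int) by push_cast; ring,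
      PySem.List.slice_natCast]
    have h0 : PySem.List.pyGet? (List.take (t + 2 - (t + 1)) (List.drop (t + 1) cs)) 0
        = (List.take (t + 2 - (t + 1)) (List.drop (t + 1) cs))[0]? := by
      simpa using
        PySem.List.pyGet?_natCast (List.take (t + 2 - (t + 1)) (List.drop (t + 1) cs)) 0
    rw [h0, List.getElem?_take_of_lt (by omega), List.getElem?_drop, Nat.add_zero]
    exact ((pvTripleB_iff cs t).mp ht).2.1

theorem pvInsertBy_congr {α : Type} (b1 b2 : α → α → Bool) (x : α) (ys : List α)
    (h : ∀ y ∈ ys, b1 x y = b2 x y) :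
    PySem.List.insertBy b1 x ys = PySem.List.insertBy b2 x ys := by
  induction ys with
  | nil => rfl
  | cons y t ih =>
    simp only [PySem.List.insertBy]
    rw [h y (by simp)]
    by_cases hb : b2 x y = true
    · rw [if_pos hb, if_pos hb]
    · rw [if_neg hb, if_neg hb, ih fun z hz => h z (by simp [hz])]

theorem pvFoldl_insertBy_congr {α : Type} (b1 b2 : α → α → Bool) (P : α → Prop)
    (hb : ∀ a b, P a → P b → b1 a b = b2 a b) :
    ∀ (xs : List α) (acc : List α), (∀ a ∈ xs, P a) → (∀ a ∈ acc, P a) →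
      xs.foldl (fun acc x => PySem.List.insertBy b1 x acc) acc
        = xs.foldl (fun acc x => PySem.List.insertBy b2 x acc) acc := by
  intro xs
  induction xs with
  | nil => intro acc _ _; rfl
  | cons x t ih =>
    intro acc hxs hacc
    simp only [List.foldl_cons]
    rw [pvInsertBy_congr b1 b2 x acc
      (fun y hy => hb x y (hxs x (by simp)) (hacc y hy))]
    refine ih _ (fun a ha => hxs a (by simp [ha])) ?_
    intro a ha
    rcases (PySem.List.mem_insertBy _ _ _ _).mp ha with rfl | ha
    · exact hxs a (by simp)
    · exact hacc a ha

theorem pvSorted2_eq_sorted (xs : List (Int × Int)) (hnd : (xs.map Prod.fst).Nodup) :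
    PySem.List.sorted2 xs Prod.fst Prod.snd = PySem.List.sorted xs Prod.fst := by
  have h2 : PySem.List.sorted2 xs Prod.fst Prod.snd =
      xs.foldl (fun acc x => PySem.List.insertBy
        (fun a b => decide (a.1 < b.1) || (!decide (b.1 < a.1) && decide (a.2 < b.2))) x acc)
        [] := rfl
  rw [h2, PySem.List.sorted_eq_foldl_insertBy]
  refine pvFoldl_insertBy_congr _ _ (· ∈ xs) ?_ xs [] (fun a ha => ha) (by simp)
  intro a b ha hb
  by_cases hab : a = b
  · subst hab
    simp
  · have hfst : a.1 ≠ b.1 := fun h => hab (List.inj_on_of_nodup_map hnd ha hb h)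
    rcases lt_trichotomy a.1 b.1 with h | h | h
    · simp [h, asymm h]
    · exact absurd h hfst
    · simp [h, asymm h]

theorem pvFold_filter (cs : List String) (l : List (Int × Int)) (acc : List String) :
    l.foldl (fun acc p => if pvCond cs p then pvAct acc p else acc) acc
      = (l.filter (fun p => decide (pvCond cs p))).foldl pvAct acc := by
  induction l generalizing acc with
  | nil => rfl
  | cons x t ih =>
    rw [List.foldl_cons, List.filter_cons]
    by_cases hx : pvCond cs x
    · rw [if_pos hx, if_pos (decide_eq_true hx), List.foldl_cons, ih]
    · rw [if_neg hx, if_neg (by simpa using hx), ih]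

theorem pvAct_shape (cs : List String) (t : Nat) :
    pvAct cs ((t : Int), (t : Int) + 2) = cs.take t ++ ["CLEAR"] ++ cs.drop (t + 3) := by
  rw [pvAct]
  rw [show ((t : Int) + 2 + 1) = ((t + 3 : Nat) : Int) by push_cast; ring]
  rw [PySem.List.slice_to_natCast, PySem.List.slice_from_natCast]

theorem pvActs_preserve (t1 : Nat) (ht1 : 1 ≤ t1) (L' : List (Int × Int))
    (hL : ∀ p ∈ L', ∃ t : Nat, t1 ≤ t ∧ p = ((t : Int), (t : Int) + 2)) :
    ∀ acc : List String, acc[t1 - 2]? = some "galanglang" →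
      (L'.foldl pvAct acc)[t1 - 2]? = some "galanglang" := by
  induction L' with
  | nil => intro acc h; exact h
  | cons p L ih =>
    intro acc h
    obtain ⟨t, htt, rfl⟩ := hL p (by simp)
    simp only [List.foldl_cons]
    refine ih (fun q hq => hL q (by simp [hq])) _ ?_
    rw [pvAct_shape]
    have htake : (acc.take t)[t1 - 2]? = some "galanglang" := by
      rw [List.getElem?_take_of_lt (by omega)]
      exact h
    rw [List.append_assoc, List.getElem?_append_left
      (List.getElem?_eq_some_iff.mp htake).1]
    exact htake

theorem pvBGo_seg (cs : List String) (t : Nat) (ht : pvTripleB cs t = true) :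
    ∀ (n i : Nat) (out : List String), n = t - i → i ≤ t →
      (∀ j, i ≤ j → j < t → pvTripleB cs j = false) →
      pvBGo cs i out = pvBGo cs (t + 3) (out ++ (cs.drop i).take (t - i) ++ ["CLEAR"]) := by
  have htlen : t + 2 < cs.length := pvTripleLt cs t ht
  intro n
  induction n with
  | zero =>
    intro i out hn hit _
    have : i = t := by omega
    subst this
    rw [pvBGo, dif_pos (by omega), if_pos ht]
    simp
  | succ n ih =>
    intro i out hn hit hno
    by_cases hieq : i = t
    · subst hieq
      rw [pvBGo, dif_pos (by omega), if_pos ht]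
      simp
    · have hilt : i < t := by omega
      rw [pvBGo, dif_pos (by omega), if_neg (by simp [hno i le_rfl hilt])]
      rw [ih (i + 1) (out ++ [cs[i]]) (by omega) (by omega) (fun j hj => hno j (by omega))]
      have hdt : (cs.drop i).take (t - i) = cs[i] :: (cs.drop (i + 1)).take (t - (i + 1)) := by
        rw [List.drop_eq_getElem_cons (by omega : i < cs.length)]
        rw [show t - i = (t - (i + 1)) + 1 by omega]
        rfl
      rw [hdt]
      simp

theorem pvBGo_prefix_get (cs : List String) :
    ∀ (n i : Nat) (out : List String) (k : Nat), cs.length - i ≤ n → k < out.length →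
      (pvBGo cs i out)[k]? = out[k]? := by
  intro n
  induction n with
  | zero =>
    intro i out k hn hk
    rw [pvBGo, dif_neg (by omega)]
  | succ n ih =>
    intro i out k hn hk
    by_cases hi : i < cs.length
    · rw [pvBGo, dif_pos hi]
      by_cases htr : pvTripleB cs i = true
      · rw [if_pos htr, ih (i + 3) _ k (by omega) (by simp; omega),
          List.getElem?_append_left hk]
      · rw [if_neg (by simp [htr]), ih (i + 1) _ k (by omega) (by simp; omega),
          List.getElem?_append_left hk]
    · rw [pvBGo, dif_neg hi]

-- ===== VERDICT (by name: the statement is the Claim_ definition above) =====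
theorem optimize_loop_invariants_spec : Claim_unchanged_optimize_loop_invariants := by
  intro cs _ hnD
  have inv := pvMinv_final cs
  have hitems_nodup :
      ((PySem.List.enumerate cs).foldl pvStep (PySem.Dict.empty, [])).1.items.Nodup := by
    have hk : ((PySem.List.enumerate cs).foldl pvStep (PySem.Dict.empty, [])).1.keys
        = ((PySem.List.enumerate cs).foldl pvStep (PySem.Dict.empty, [])).1.items.map
            Prod.fst := rfl
    exact List.Nodup.of_map Prod.fst (hk ▸ inv.h3)
  rw [optimize_loop_invariants_alt, pvA_eq_foldl]
  rcases hcase : (List.range cs.length).filter (fun i => pvTripleB cs i) with _ | ⟨t0, _ | ⟨t1, r⟩⟩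
  · -- no triple anywhere
    have hno : ∀ j, pvTripleB cs j = false := by
      intro j
      cases hj : pvTripleB cs j with
      | false => rfl
      | true =>
        have : j ∈ (List.range cs.length).filter (fun i => pvTripleB cs i) :=
          List.mem_filter.mpr ⟨List.mem_range.mpr (by have := pvTripleLt cs j hj; omega), hj⟩
        rw [hcase] at this
        simp at this
    rw [pvFold_id cs _ cs (fun p hps hc => by
      obtain ⟨t, htt, -⟩ := pvCond_char cs p (Or.inr hps) hc
      rw [hno t] at htt
      exact absurd htt (by simp))]
    rw [pvBGo_no_triple cs 0 [] (fun j _ => hno j)]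
    simp
  · -- exactly one triple, at t0
    have ht0 : pvTripleB cs t0 = true := by
      have : t0 ∈ (List.range cs.length).filter (fun i => pvTripleB cs i) := by
        rw [hcase]; simp
      exact (List.mem_filter.mp this).2
    have huniq : ∀ j, pvTripleB cs j = true → j = t0 := by
      intro j hj
      have : j ∈ (List.range cs.length).filter (fun i => pvTripleB cs i) :=
        List.mem_filter.mpr ⟨List.mem_range.mpr (by have := pvTripleLt cs j hj; omega), hj⟩
      rw [hcase] at this
      simpa using this
    have hlen : t0 + 2 < cs.length := pvTripleLt cs t0 ht0
    have hmem : ((t0 : Int), (t0 : Int) + 2) ∈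
        PySem.List.sorted2
          ((PySem.List.enumerate cs).foldl pvStep (PySem.Dict.empty, [])).1.items
          Prod.fst Prod.snd :=
      (PySem.List.sorted2_perm _ _ _ _).mem_iff.mpr (pvTriple_mem_items cs t0 ht0)
    have hnodup : (PySem.List.sorted2
        ((PySem.List.enumerate cs).foldl pvStep (PySem.Dict.empty, [])).1.items
        Prod.fst Prod.snd).Nodup :=
      (PySem.List.sorted2_perm _ _ _ _).nodup_iff.mpr hitems_nodup
    have hcond : pvCond cs ((t0 : Int), (t0 : Int) + 2) := by
      refine ⟨by omega, ?_, ?_⟩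
      · rw [show ((t0 : Int) + 1) = ((t0 + 1 : Nat) : Int) by push_cast; ring,
          show ((t0 : Int) + 2) = ((t0 + 2 : Nat) : Int) by push_cast; ring,
          PySem.List.slice_natCast, List.length_take, List.length_drop]
        omega
      · rw [show ((t0 : Int) + 1) = ((t0 + 1 : Nat) : Int) by push_cast; ring,
          show ((t0 : Int) + 2) = ((t0 + 2 : Nat) : Int) by push_cast; ring,
          PySem.List.slice_natCast]
        have h0 : PySem.List.pyGet? (List.take (t0 + 2 - (t0 + 1)) (List.drop (t0 + 1) cs)) 0
            = (List.take (t0 + 2 - (t0 + 1)) (List.drop (t0 + 1) cs))[0]? := by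
          simpa using
            PySem.List.pyGet?_natCast (List.take (t0 + 2 - (t0 + 1)) (List.drop (t0 + 1) cs)) 0
        rw [h0, List.getElem?_take_of_lt (by omega), List.getElem?_drop, Nat.add_zero]
        exact ((pvTripleB_iff cs t0).mp ht0).2.1
    rw [pvFold_one cs _ cs ((t0 : Int), (t0 : Int) + 2)
      (List.count_eq_one_of_mem hnodup hmem) hcond
      (fun p hps hc => by
        obtain ⟨t, htt, hpe⟩ := pvCond_char cs p (Or.inr hps) hc
        rw [huniq t htt] at hpe
        exact hpe)]
    rw [pvBGo_one cs t0 ht0 huniq (t0 - 0) 0 [] rfl (Nat.zero_le _)]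
    rw [pvAct]
    rw [show ((t0 : Int) + 2 + 1) = ((t0 + 3 : Nat) : Int) by push_cast; ring]
    rw [PySem.List.slice_to_natCast, PySem.List.slice_from_natCast]
    simp
  · -- two or more triples: contradicts ¬D
    exfalso
    apply hnD
    have hnd : ((List.range cs.length).filter (fun i => pvTripleB cs i)).Nodup :=
      (List.nodup_range).filter _
    have hmem0 : t0 ∈ (List.range cs.length).filter (fun i => pvTripleB cs i) := by
      rw [hcase]; simp
    have hmem1 : t1 ∈ (List.range cs.length).filter (fun i => pvTripleB cs i) := by
      rw [hcase]; simp
    have htr0 := (List.mem_filter.mp hmem0).2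
    have htr1 := (List.mem_filter.mp hmem1).2
    have hlen0 := List.mem_range.mp (List.mem_filter.mp hmem0).1
    have hlen1 := List.mem_range.mp (List.mem_filter.mp hmem1).1
    have hne : t0 ≠ t1 := by
      rw [hcase] at hnd
      intro h
      subst h
      simp at hnd
    have hs0 := (pvTripleB_shape cs t0).mp htr0
    have hs1 := (pvTripleB_shape cs t1).mp htr1
    rcases Nat.lt_or_ge t0 t1 with hlt | hge
    · exact ⟨t0, hlen0, t1, hlen1, hlt, hs0, hs1⟩
    · exact ⟨t1, hlen1, t0, hlen0, by omega, hs1, hs0⟩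

theorem optimize_loop_invariants_changed : Claim_changed_optimize_loop_invariants := by
  unfold Claim_changed_optimize_loop_invariants
  refine ⟨by decide, by decide, by decide, ?_, by decide⟩
  simp [optimize_loop_invariants_alt, pvBGo, pvTripleB, pvDiffWitness_optimize_loop_invariants,
    pvDiffWitnessOut_optimize_loop_invariants]

theorem optimize_loop_invariants_tight : Claim_exact_optimize_loop_invariants := by
  intro cs _ hD
  obtain ⟨i0, hi0, j0, hj0, hij0, hsi, hsj⟩ := hD
  have htripi : pvTripleB cs i0 = true := (pvTripleB_shape cs i0).mpr hsi
  have htripj : pvTripleB cs j0 = true := (pvTripleB_shape cs j0).mpr hsj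
  have hpairts : ((List.range cs.length).filter (fun i => pvTripleB cs i)).Pairwise (· < ·) :=
    List.Pairwise.filter _ List.pairwise_lt_range
  have hmemi : i0 ∈ (List.range cs.length).filter (fun i => pvTripleB cs i) :=
    List.mem_filter.mpr ⟨List.mem_range.mpr hi0, htripi⟩
  have hmemj : j0 ∈ (List.range cs.length).filter (fun i => pvTripleB cs i) :=
    List.mem_filter.mpr ⟨List.mem_range.mpr hj0, htripj⟩
  rcases hcase : (List.range cs.length).filter (fun i => pvTripleB cs i) with _ | ⟨t0, _ | ⟨t1, r⟩⟩
  · rw [hcase] at hmemi; simp at hmemi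
  · rw [hcase] at hmemi hmemj
    simp at hmemi hmemj
    omega
  rw [hcase] at hpairts hmemi hmemj
  have htrip0 : pvTripleB cs t0 = true := by
    have : t0 ∈ (List.range cs.length).filter (fun i => pvTripleB cs i) := by rw [hcase]; simp
    exact (List.mem_filter.mp this).2
  have htrip1 : pvTripleB cs t1 = true := by
    have : t1 ∈ (List.range cs.length).filter (fun i => pvTripleB cs i) := by rw [hcase]; simp
    exact (List.mem_filter.mp this).2
  have ht01 : t0 < t1 := by
    rcases List.pairwise_cons.mp hpairts with ⟨hall, -⟩
    exact hall t1 (by simp)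
  have hmin : ∀ j, pvTripleB cs j = true → j = t0 ∨ t1 ≤ j := by
    intro j hj
    have hmem : j ∈ t0 :: t1 :: r := by
      rw [← hcase]
      exact List.mem_filter.mpr
        ⟨List.mem_range.mpr (by have := pvTripleLt cs j hj; omega), hj⟩
    rcases List.pairwise_cons.mp hpairts with ⟨-, hp1⟩
    rcases List.pairwise_cons.mp hp1 with ⟨hall1, -⟩
    rcases List.mem_cons.mp hmem with h | hmem2
    · exact Or.inl h
    · rcases List.mem_cons.mp hmem2 with h | h
      · exact Or.inr (by omega)
      · exact Or.inr (le_of_lt (hall1 j h))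
  have hsep : t0 + 3 ≤ t1 := by
    by_contra hcon
    obtain ⟨h0a, h0b, h0c⟩ := (pvTripleB_iff cs t0).mp htrip0
    obtain ⟨h1a, h1b, h1c⟩ := (pvTripleB_iff cs t1).mp htrip1
    rcases (show t1 = t0 + 1 ∨ t1 = t0 + 2 by omega) with h | h
    · rw [h] at h1a; rw [h0b] at h1a; simp at h1a
    · rw [h] at h1a; rw [h0c] at h1a; simp at h1a
  have hlen1 : t1 + 2 < cs.length := pvTripleLt cs t1 htrip1
  have inv := pvMinv_final cs
  have hitems_nodup :
      ((PySem.List.enumerate cs).foldl pvStep (PySem.Dict.empty, [])).1.items.Nodup := by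
    have hk : ((PySem.List.enumerate cs).foldl pvStep (PySem.Dict.empty, [])).1.keys
        = ((PySem.List.enumerate cs).foldl pvStep (PySem.Dict.empty, [])).1.items.map
            Prod.fst := rfl
    exact List.Nodup.of_map Prod.fst (hk ▸ inv.h3)
  have hmapnodup :
      (((PySem.List.enumerate cs).foldl pvStep (PySem.Dict.empty, [])).1.items.map
        Prod.fst).Nodup := inv.h3
  -- A's value at index t1 - 2 is "galanglang"
  intro heq
  have hA : (optimize_loop_invariants cs)[t1 - 2]? = some "galanglang" := by
    rw [pvA_eq_foldl, pvSorted2_eq_sorted _ hmapnodup, pvFold_filter]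
    set L := (PySem.List.sorted
      ((PySem.List.enumerate cs).foldl pvStep (PySem.Dict.empty, [])).1.items Prod.fst).filter
      (fun p => decide (pvCond cs p)) with hLdef
    have hsortmem : ∀ p, p ∈ PySem.List.sorted
        ((PySem.List.enumerate cs).foldl pvStep (PySem.Dict.empty, [])).1.items Prod.fst ↔
        p ∈ ((PySem.List.enumerate cs).foldl pvStep (PySem.Dict.empty, [])).1.items :=
      fun p => (PySem.List.sorted_perm _ _ _).mem_iff
    have hmemL : ∀ p ∈ L, ∃ t : Nat, pvTripleB cs t = true ∧ p = ((t : Int), (t : Int) + 2) := by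
      intro p hp
      have hps := (List.mem_filter.mp hp).1
      have hpc : pvCond cs p := of_decide_eq_true (List.mem_filter.mp hp).2
      exact pvCond_char cs p (Or.inl ((hsortmem p).mp hps)) hpc
    have hq0 : ((t0 : Int), (t0 : Int) + 2) ∈ L := by
      refine List.mem_filter.mpr ⟨(hsortmem _).mpr (pvTriple_mem_items cs t0 htrip0), ?_⟩
      exact decide_eq_true (pvCond_triple cs t0 htrip0)
    have hLpair : L.Pairwise (fun a b => a.1 ≤ b.1) :=
      List.Pairwise.filter _ (PySem.List.sorted_pairwise _ _)
    have hLnodup : L.Nodup :=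
      List.Nodup.filter _ ((PySem.List.sorted_perm _ _ _).nodup_iff.mpr hitems_nodup)
    rcases hL : L with _ | ⟨q, L'⟩
    · rw [hL] at hq0; simp at hq0
    rw [hL] at hq0 hLpair hLnodup hmemL
    obtain ⟨tq, htq, rfl⟩ := hmemL q (by simp)
    have hqt0 : tq = t0 := by
      rcases hmin tq htq with h | h
      · exact h
      · exfalso
        rcases List.mem_cons.mp hq0 with h0 | h0
        · have hfq : (t0 : Int) = (tq : Int) := congrArg Prod.fst h0
          omega
        · rcases List.pairwise_cons.mp hLpair with ⟨hall, -⟩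
          have hle := hall _ h0
          simp only at hle
          omega
    subst hqt0
    have hL' : ∀ p ∈ L', ∃ t : Nat, t1 ≤ t ∧ p = ((t : Int), (t : Int) + 2) := by
      intro p hp
      obtain ⟨t, htt, rfl⟩ := hmemL p (by simp [hp])
      refine ⟨t, ?_, rfl⟩
      rcases hmin t htt with h | h
      · subst h
        exact absurd hp (List.nodup_cons.mp hLnodup).1
      · exact h
    simp only [List.foldl_cons]
    refine pvActs_preserve t1 (by omega) L' hL' _ ?_
    rw [pvAct_shape]
    have hlt0 : (cs.take tq).length = tq := List.length_take_of_le (by omega)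
    rw [List.append_assoc, List.getElem?_append_right (by omega : (cs.take tq).length ≤ t1 - 2),
      hlt0]
    rw [List.getElem?_append_right (by simp; omega)]
    simp only [List.length_singleton]
    rw [List.getElem?_drop]
    rw [show tq + 3 + (t1 - 2 - tq - 1) = t1 by omega]
    exact ((pvTripleB_iff cs t1).mp htrip1).1
  -- B's value at index t1 - 2 is "CLEAR"
  have hB : (optimize_loop_invariants_alt cs)[t1 - 2]? = some "CLEAR" := by
    rw [optimize_loop_invariants_alt]
    rw [pvBGo_seg cs t0 htrip0 (t0 - 0) 0 [] rfl (by omega) (fun j _ hj => by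
      cases hjt : pvTripleB cs j with
      | false => rfl
      | true => rcases hmin j hjt with h | h <;> omega)]
    rw [pvBGo_seg cs t1 htrip1 (t1 - (t0 + 3)) (t0 + 3) _ rfl (by omega) (fun j hj1 hj2 => by
      cases hjt : pvTripleB cs j with
      | false => rfl
      | true => rcases hmin j hjt with h | h <;> omega)]
    set out2 := ([] ++ (cs.drop 0).take (t0 - 0) ++ ["CLEAR"]) ++
      (cs.drop (t0 + 3)).take (t1 - (t0 + 3)) ++ ["CLEAR"] with hout2
    have hlenout : out2.length = t1 - 1 := by
      rw [hout2]
      simp only [List.length_append, List.length_singleton, List.length_take,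
        List.length_drop, List.drop_zero, Nat.sub_zero, List.nil_append, List.length_take]
      have : min t0 cs.length = t0 := by omega
      omega
    rw [pvBGo_prefix_get cs (cs.length - (t1 + 3)) (t1 + 3) out2 (t1 - 2) le_rfl (by omega)]
    have hsplit : out2 = (([] ++ (cs.drop 0).take (t0 - 0) ++ ["CLEAR"]) ++
        (cs.drop (t0 + 3)).take (t1 - (t0 + 3))) ++ ["CLEAR"] := by
      rw [hout2, List.append_assoc]
    have hlenpre : (([] ++ (cs.drop 0).take (t0 - 0) ++ ["CLEAR"]) ++
        (cs.drop (t0 + 3)).take (t1 - (t0 + 3))).length = t1 - 2 := by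
      simp only [List.length_append, List.length_singleton, List.length_take,
        List.length_drop, List.drop_zero, Nat.sub_zero, List.nil_append]
      have : min t0 cs.length = t0 := by omega
      omega
    rw [hsplit, ← hlenpre, List.getElem?_concat_length]
  rw [heq, hB] at hA
  simp at hA
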